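-- pv_equiv track=rewrite | github.com/grefl/learn | algorithms/leetcode/valid_anagram.py | valid_anagram_classic
-- ===== SOURCE A (Python) =====
-- def valid_anagram_classic(s, t):
--     if len(s) != len(t):
--         return False
--     m1 = {}
--     m2 = {}
--     for i in range(len(s)):
--         m1[s[i]] = 1 + m1.get(s[i], 0)
--         m2[t[i]] = 1 + m2.get(t[i], 0)
--
--     for c in s:
--         if m1[c] != m2.get(c, 0):
--             return False
--     return True
-- ===== SOURCE B (Python) =====
-- def valid_anagram_classic(s, t):
--     return sorted(s) == sorted(t)
-- ===== Notes on version B (the rewrite author's own statement) =====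
-- stated objective: simpler
-- what changed: Replaces the two frequency dictionaries and the membership-check loop with a single sort-and-compare: sorted(s) == sorted(t).
import Mathlib
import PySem

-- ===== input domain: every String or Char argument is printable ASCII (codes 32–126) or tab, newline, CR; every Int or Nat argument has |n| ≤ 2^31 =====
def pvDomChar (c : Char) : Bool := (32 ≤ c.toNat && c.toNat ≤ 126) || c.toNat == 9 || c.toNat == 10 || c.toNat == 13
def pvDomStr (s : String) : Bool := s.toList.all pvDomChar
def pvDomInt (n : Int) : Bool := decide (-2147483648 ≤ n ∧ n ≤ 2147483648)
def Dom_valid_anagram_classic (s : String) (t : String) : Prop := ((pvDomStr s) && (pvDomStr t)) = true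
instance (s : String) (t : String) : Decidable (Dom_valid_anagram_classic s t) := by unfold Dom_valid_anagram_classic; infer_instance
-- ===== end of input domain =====

-- B replaces A's two frequency dictionaries and membership loop by a single sort-and-compare (objective: simpler).

-- ===== PORT A =====
-- 'm1[c]' in the final loop: c ∈ s, so the key is always present; getD c 0 returns the same stored value.
def valid_anagram_classic (s : String) (t : String) : Bool :=
  let sl := s.toList
  let tl := t.toList
  if sl.length ≠ tl.length then false
  else
    let ms := (PySem.List.pyRange 0 (PySem.List.len sl) 1).foldl
      (fun (m : PySem.Dict Char Int × PySem.Dict Char Int) i =>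
        (m.1.insert (PySem.List.pyGetD sl i ' ') (1 + m.1.getD (PySem.List.pyGetD sl i ' ') 0),
         m.2.insert (PySem.List.pyGetD tl i ' ') (1 + m.2.getD (PySem.List.pyGetD tl i ' ') 0)))
      (PySem.Dict.empty, PySem.Dict.empty)
    sl.all (fun c => ms.1.getD c 0 == ms.2.getD c 0)

-- ===== PORT B =====
def valid_anagram_classic_alt (s : String) (t : String) : Bool :=
  PySem.List.sorted s.toList (fun c => c) == PySem.List.sorted t.toList (fun c => c)

-- ===== PRECONDITION & SPEC =====
def Spec_valid_anagram_classic (s : String) (t : String) (out : Bool) : Prop := out = valid_anagram_classic_alt s t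
instance (s : String) (t : String) (out : Bool) : Decidable (Spec_valid_anagram_classic s t out) := by unfold Spec_valid_anagram_classic; infer_instance

-- ===== CLAIM (what is proved, stated in full; the proofs are below) =====
def Claim_equal_valid_anagram_classic : Prop := ∀ (s : String) (t : String), Dom_valid_anagram_classic s t → Spec_valid_anagram_classic s t (valid_anagram_classic s t)

-- ===== LEMMAS AND PROOFS =====

-- equal counts on members of sl plus equal lengths force a permutation
theorem pv_perm_of_counts (sl tl : List Char) (hlen : sl.length = tl.length)
    (h : ∀ c ∈ sl, sl.count c = tl.count c) : sl.Perm tl := by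
  refine List.perm_iff_count.mpr (fun c => ?_)
  by_cases hc : c ∈ sl
  · simpa [List.count] using h c hc
  · rw [List.count_eq_zero.mpr hc, eq_comm, List.count_eq_zero]
    intro hct
    have hsub : sl.toFinset ⊆ tl.toFinset := by
      intro x hx
      rw [List.mem_toFinset] at hx ⊢
      have := h x hx
      have hp : 0 < tl.count x := by
        have := List.count_pos_iff.mpr hx
        omega
      exact List.count_pos_iff.mp hp
    have hsum1 : ∑ a ∈ sl.toFinset, tl.count a = sl.length := by
      rw [← List.sum_toFinset_count_eq_length sl]
      exact Finset.sum_congr rfl (fun a ha => (h a (List.mem_toFinset.mp ha)).symm)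
    have hsum2 : ∑ a ∈ tl.toFinset \ sl.toFinset, tl.count a
        + ∑ a ∈ sl.toFinset, tl.count a = ∑ a ∈ tl.toFinset, tl.count a :=
      Finset.sum_sdiff hsub
    rw [hsum1, List.sum_toFinset_count_eq_length tl, hlen] at hsum2
    have hz : ∑ a ∈ tl.toFinset \ sl.toFinset, tl.count a = 0 := by omega
    have hcmem : c ∈ tl.toFinset \ sl.toFinset := by
      simp [Finset.mem_sdiff, List.mem_toFinset, hct, hc]
    have := (Finset.sum_eq_zero_iff.mp hz) c hcmem
    have := List.count_pos_iff.mpr hct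
    omega

-- B is true exactly on permutations
theorem pv_alt_iff (s t : String) :
    valid_anagram_classic_alt s t = true ↔ s.toList.Perm t.toList := by
  unfold valid_anagram_classic_alt
  rw [beq_iff_eq]
  constructor
  · intro h
    exact ((PySem.List.sorted_perm s.toList (fun c => c) false).symm.trans
      (h ▸ PySem.List.sorted_perm t.toList (fun c => c) false))
  · intro h
    have h1 : (PySem.List.sorted t.toList (fun c => c)).Perm s.toList :=
      (PySem.List.sorted_perm t.toList (fun c => c) false).trans h.symm
    have h2 := PySem.List.sorted_pairwise t.toList (fun c => c)
    exact PySem.List.sorted_id_eq_of_perm_of_pairwise s.toList _ h1 h2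

-- the pair-of-dicts loop, componentwise: each lookup is a count
theorem pv_A_counts (s t : String) (hlen : s.toList.length = t.toList.length) :
    valid_anagram_classic s t
      = s.toList.all (fun c => ((s.toList.count c : Int)) == (t.toList.count c : Int)) := by
  unfold valid_anagram_classic
  simp only [if_neg (not_not.mpr hlen)]
  have hsplit : (PySem.List.pyRange 0 (PySem.List.len s.toList) 1).foldl
      (fun (m : PySem.Dict Char Int × PySem.Dict Char Int) i =>
        (m.1.insert (PySem.List.pyGetD s.toList i ' ') (1 + m.1.getD (PySem.List.pyGetD s.toList i ' ') 0),
         m.2.insert (PySem.List.pyGetD t.toList i ' ') (1 + m.2.getD (PySem.List.pyGetD t.toList i ' ') 0)))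
      (PySem.Dict.empty, PySem.Dict.empty)
      = ((PySem.List.pyRange 0 (PySem.List.len s.toList) 1).foldl
          (fun (d : PySem.Dict Char Int) i =>
            d.insert (PySem.List.pyGetD s.toList i ' ') (1 + d.getD (PySem.List.pyGetD s.toList i ' ') 0))
          PySem.Dict.empty,
         (PySem.List.pyRange 0 (PySem.List.len s.toList) 1).foldl
          (fun (d : PySem.Dict Char Int) i =>
            d.insert (PySem.List.pyGetD t.toList i ' ') (1 + d.getD (PySem.List.pyGetD t.toList i ' ') 0))
          PySem.Dict.empty) :=
    PySem.List.foldl_prod_mk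
      (fun (d : PySem.Dict Char Int) (i : Int) =>
        d.insert (PySem.List.pyGetD s.toList i ' ') (1 + d.getD (PySem.List.pyGetD s.toList i ' ') 0))
      (fun (d : PySem.Dict Char Int) (i : Int) =>
        d.insert (PySem.List.pyGetD t.toList i ' ') (1 + d.getD (PySem.List.pyGetD t.toList i ' ') 0))
      _ PySem.Dict.empty PySem.Dict.empty
  rw [hsplit]
  have hlen' : PySem.List.len s.toList = PySem.List.len t.toList := by
    simp [PySem.List.len, hlen]
  have e1 := PySem.List.foldl_pyRange_zero_pyGetD s.toList ' '
    (fun (d : PySem.Dict Char Int) c => d.insert c (1 + d.getD c 0)) PySem.Dict.empty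
  have e2 := PySem.List.foldl_pyRange_zero_pyGetD t.toList ' '
    (fun (d : PySem.Dict Char Int) c => d.insert c (1 + d.getD c 0)) PySem.Dict.empty
  rw [e1, hlen', e2]
  have hfun : (fun (d : PySem.Dict Char Int) c => d.insert c (1 + d.getD c 0))
      = (fun (d : PySem.Dict Char Int) c => d.insert c (d.getD c 0 + 1)) := by
    funext d c; rw [Int.add_comm]
  rw [hfun]
  apply List.all_congr rfl
  intro c
  rw [PySem.Dict.getD_foldl_insert_add_one, PySem.Dict.getD_foldl_insert_add_one,
    PySem.Dict.getD_empty]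
  norm_num

-- ===== VERDICT (by name: the statement is the Claim_ definition above) =====
theorem valid_anagram_classic_spec : Claim_equal_valid_anagram_classic := by
  intro s t _
  unfold Spec_valid_anagram_classic
  rw [Bool.eq_iff_iff, pv_alt_iff]
  by_cases hlen : s.toList.length = t.toList.length
  · rw [pv_A_counts s t hlen, List.all_eq_true]
    constructor
    · intro h
      refine pv_perm_of_counts _ _ hlen (fun c hc => ?_)
      have := h c hc
      rw [beq_iff_eq] at this
      exact_mod_cast this
    · intro h c _
      rw [beq_iff_eq, Nat.cast_inj]
      exact h.count_eq c
  · constructor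
    · intro h
      unfold valid_anagram_classic at h
      rw [if_pos hlen] at h
      exact absurd h (by simp)
    · intro h
      exact absurd h.length_eq hlen
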